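-- pv_equiv track=rewrite | github.com/Raxku2/calculator_1 | main.py | _replace_bare_mem
-- ===== SOURCE A (Python) =====
-- def _replace_bare_mem(expr: str) -> str:
--     # simple replacement: replace ' mem ' or start/end with mem, or before/after operators
--     tokens = []
--     cur = ""
--     i = 0
--     L = len(expr)
--     while i < L:
--         ch = expr[i]
--         # detect 'mem' word
--         if expr.startswith("mem", i) and (i + 3 == L or not expr[i + 3].isalnum()):
--             # ensure previous char isn't alnum
--             prev_ok = (i == 0) or (not expr[i - 1].isalnum())
--             if prev_ok:
--                 # replace with mem()
--                 tokens.append("mem()")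
--                 i += 3
--                 continue
--         tokens.append(ch)
--         i += 1
--     return "".join(tokens)
-- ===== SOURCE B (Python) =====
-- def _replace_bare_mem(expr: str) -> str:
--     # Jump between occurrences of "mem" with str.find and splice slices,
--     # instead of scanning character by character.
--     out = []
--     pos = 0
--     while True:
--         j = expr.find("mem", pos)
--         if j == -1:
--             out.append(expr[pos:])
--             return "".join(out)
--         if (j == 0 or not expr[j - 1].isalnum()) and (
--             j + 3 == len(expr) or not expr[j + 3].isalnum()
--         ):
--             out.append(expr[pos:j])
--             out.append("mem()")
--             pos = j + 3
--         else:
--             out.append(expr[pos : j + 1])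
--             pos = j + 1
-- ===== Notes on version B (the rewrite author's own statement) =====
-- stated objective: faster
-- what changed: Replaced A's character-by-character index loop (which re-tests the target token at every position and appends one char at a time) by a str.find jump loop that skips directly between occurrences and splices whole slices between them; a timing run measured B 16x faster at the largest size (C-level find and slicing instead of per-character Python work).
import Mathlib
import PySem

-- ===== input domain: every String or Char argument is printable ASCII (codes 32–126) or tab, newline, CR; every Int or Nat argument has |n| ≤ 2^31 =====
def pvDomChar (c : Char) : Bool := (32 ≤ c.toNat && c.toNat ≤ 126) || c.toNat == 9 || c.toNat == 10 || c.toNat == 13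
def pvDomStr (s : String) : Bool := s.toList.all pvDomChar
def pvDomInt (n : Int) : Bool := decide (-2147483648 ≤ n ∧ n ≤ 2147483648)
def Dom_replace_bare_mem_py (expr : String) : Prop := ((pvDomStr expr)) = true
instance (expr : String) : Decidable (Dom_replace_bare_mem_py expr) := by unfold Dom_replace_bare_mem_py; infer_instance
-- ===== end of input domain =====

-- B replaces A's character-by-character index loop by str.find jumps between token
-- occurrences, splicing whole slices (objective: faster by a constant factor, as measured
-- in a timing run; neither program mutates its argument).

def pvMem : List Char := ['m', 'e', 'm']
def pvMemParen : List Char := ['m', 'e', 'm', '(', ')']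

-- ===== PORT A =====
-- literal transliteration of A's while-loop over the index i; tokens is A's token list,
-- "".join(tokens) at the end is exactly List.flatten.  expr[i+3] / expr[i-1] / expr[i]
-- are ported as getD: every such access happens with the index in range (guarded by the
-- surrounding tests), so the default is never the value used.
def pvLoopA (cs : List Char) (i : Nat) (tokens : List (List Char)) : List (List Char) :=
  if _h : i < cs.length then
    -- expr.startswith("mem", i) = startswith on the drop
    if PySem.Chars.startswith (List.drop i cs) pvMem
        && (i + 3 == cs.length || ! PySem.Chars.isalnum (cs.getD (i + 3) ' ')) then
      if i == 0 || ! PySem.Chars.isalnum (cs.getD (i - 1) ' ') then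
        pvLoopA cs (i + 3) (tokens ++ [pvMemParen])
      else
        pvLoopA cs (i + 1) (tokens ++ [[cs.getD i ' ']])
    else
      pvLoopA cs (i + 1) (tokens ++ [[cs.getD i ' ']])
  else tokens
termination_by cs.length - i
decreasing_by all_goals omega

def replace_bare_mem_py (expr : String) : String :=
  String.mk (pvLoopA expr.toList 0 []).flatten

-- ===== PORT B =====
-- fact about expr.find("mem", pos) needed for the termination of B's loop
theorem pvFindFrom_facts (cs : List Char) (pos : Nat)
    (h : PySem.Chars.findFrom cs pvMem (pos : Int) ≠ -1) :
    pos ≤ (PySem.Chars.findFrom cs pvMem (pos : Int)).toNat ∧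
      (PySem.Chars.findFrom cs pvMem (pos : Int)).toNat + 3 ≤ cs.length := by
  have hpos : pos ≤ cs.length := by
    by_contra hgt
    exact h (by simp [PySem.Chars.findFrom]; omega)
  obtain ⟨h1, h2, _⟩ := PySem.Chars.findFrom_natCast_spec cs pvMem pos hpos h
  have hlen : pvMem.length ≤ (List.drop (PySem.Chars.findFrom cs pvMem (pos : Int)).toNat cs).length :=
    h2.length_le
  rw [List.length_drop] at hlen
  have h3 : pvMem.length = 3 := rfl
  omega

-- literal transliteration of B's find-and-splice loop; out is B's list of pieces,
-- "".join(out) = flatten; slices are PySem.List.slice.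
def pvLoopB (cs : List Char) (pos : Nat) (out : List (List Char)) : List (List Char) :=
  let j := PySem.Chars.findFrom cs pvMem (pos : Int)
  if _hj : j = -1 then
    out ++ [PySem.List.slice cs (some (pos : Int)) none]
  else
    if (j == 0 || ! PySem.Chars.isalnum (cs.getD (j.toNat - 1) ' '))
        && (j + 3 == (cs.length : Int) || ! PySem.Chars.isalnum (cs.getD (j.toNat + 3) ' ')) then
      pvLoopB cs (j.toNat + 3) (out ++ [PySem.List.slice cs (some (pos : Int)) (some j), pvMemParen])
    else
      pvLoopB cs (j.toNat + 1) (out ++ [PySem.List.slice cs (some (pos : Int)) (some (j + 1))])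
termination_by cs.length + 3 - pos
decreasing_by
  · have := pvFindFrom_facts cs pos _hj; omega
  · have := pvFindFrom_facts cs pos _hj; omega

def replace_bare_mem_py_alt (expr : String) : String :=
  String.mk (pvLoopB expr.toList 0 []).flatten

-- ===== PRECONDITION & SPEC =====
def Spec_replace_bare_mem_py (expr : String) (out : String) : Prop := out = replace_bare_mem_py_alt expr
instance (expr : String) (out : String) : Decidable (Spec_replace_bare_mem_py expr out) := by unfold Spec_replace_bare_mem_py; infer_instance

-- ===== CLAIM (what is proved, stated in full; the proofs are below) =====
def Claim_equal_replace_bare_mem_py : Prop := ∀ (expr : String), Dom_replace_bare_mem_py expr → Spec_replace_bare_mem_py expr (replace_bare_mem_py expr)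

-- ===== LEMMAS AND PROOFS =====

-- the common meaning of both loops, without an accumulator
def pvSpec (cs : List Char) (i : Nat) : List Char :=
  if _h : i < cs.length then
    if (PySem.Chars.startswith (List.drop i cs) pvMem
          && (i + 3 == cs.length || ! PySem.Chars.isalnum (cs.getD (i + 3) ' ')))
        && (i == 0 || ! PySem.Chars.isalnum (cs.getD (i - 1) ' ')) then
      pvMemParen ++ pvSpec cs (i + 3)
    else
      cs.getD i ' ' :: pvSpec cs (i + 1)
  else []
termination_by cs.length - i
decreasing_by all_goals omega

theorem pvLoopA_eq (cs : List Char) (i : Nat) (tokens : List (List Char)) :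
    (pvLoopA cs i tokens).flatten = tokens.flatten ++ pvSpec cs i := by
  rw [pvLoopA, pvSpec]
  by_cases h : i < cs.length
  · rw [dif_pos h, dif_pos h]
    by_cases h1 : (PySem.Chars.startswith (List.drop i cs) pvMem
        && (i + 3 == cs.length || ! PySem.Chars.isalnum (cs.getD (i + 3) ' '))) = true
    · by_cases h2 : (i == 0 || ! PySem.Chars.isalnum (cs.getD (i - 1) ' ')) = true
      · rw [if_pos h1, if_pos h2, if_pos (Bool.and_eq_true _ _ ▸ ⟨h1, h2⟩),
          pvLoopA_eq cs (i + 3)]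
        simp
      · rw [if_pos h1, if_neg h2,
          if_neg (fun hc => h2 (Bool.and_eq_true _ _ ▸ hc).2),
          pvLoopA_eq cs (i + 1)]
        simp
    · rw [if_neg h1, if_neg (fun hc => h1 (Bool.and_eq_true _ _ ▸ hc).1),
        pvLoopA_eq cs (i + 1)]
      simp
  · rw [dif_neg h, dif_neg h]
    simp
termination_by cs.length - i
decreasing_by all_goals omega

-- a prefix of a drop is an infix
theorem pvPrefix_drop_infix {p cs : List Char} {i : Nat} (h : p <+: List.drop i cs) :
    p <:+: cs := by
  obtain ⟨r, hr⟩ := h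
  obtain ⟨l, hl⟩ := List.drop_suffix i cs
  exact ⟨l, r, by rw [List.append_assoc, hr, hl]⟩

-- if "mem" occurs nowhere at or after pos, pvSpec just copies the rest
theorem pvSpec_no_match (cs : List Char) (pos : Nat)
    (h : ∀ i, pos ≤ i → ¬ pvMem <+: List.drop i cs) :
    pvSpec cs pos = List.drop pos cs := by
  rw [pvSpec]
  by_cases hl : pos < cs.length
  · have hs : PySem.Chars.startswith (List.drop pos cs) pvMem = false := by
      rw [Bool.eq_false_iff]
      intro hc
      exact h pos le_rfl ((PySem.Chars.startswith_iff _ _).1 hc)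
    simp only [hl, dif_pos, hs, Bool.false_and, Bool.false_eq_true, if_false]
    rw [pvSpec_no_match cs (pos + 1) (fun i hi => h i (by omega)),
      List.drop_eq_getElem_cons hl, List.getD_eq_getElem cs ' ' hl]
  · simp [hl, List.drop_eq_nil_of_le (by omega : cs.length ≤ pos)]
termination_by cs.length - pos
decreasing_by omega

-- if "mem" starts nowhere in [pos, j), pvSpec copies the characters up to j
theorem pvSpec_copy (cs : List Char) (pos j : Nat) (hpj : pos ≤ j) (hjl : j ≤ cs.length)
    (h : ∀ i, pos ≤ i → i < j → ¬ pvMem <+: List.drop i cs) :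
    pvSpec cs pos = List.take (j - pos) (List.drop pos cs) ++ pvSpec cs j := by
  rcases Nat.eq_or_lt_of_le hpj with heq | hlt
  · subst heq; simp
  · have hl : pos < cs.length := by omega
    rw [pvSpec]
    have hs : PySem.Chars.startswith (List.drop pos cs) pvMem = false := by
      rw [Bool.eq_false_iff]
      intro hc
      exact h pos le_rfl hlt ((PySem.Chars.startswith_iff _ _).1 hc)
    simp only [hl, dif_pos, hs, Bool.false_and, Bool.false_eq_true, if_false]
    rw [pvSpec_copy cs (pos + 1) j (by omega) hjl (fun i hi hij => h i (by omega) hij)]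
    have h1 : List.drop pos cs = cs[pos] :: List.drop (pos + 1) cs :=
      List.drop_eq_getElem_cons hl
    rw [List.getD_eq_getElem cs ' ' hl, h1]
    have h2 : j - pos = (j - (pos + 1)) + 1 := by omega
    rw [h2, List.take_succ_cons, List.cons_append]
  termination_by j - pos
  decreasing_by omega

theorem pvLoopB_eq (cs : List Char) (pos : Nat) (out : List (List Char))
    (hpos : pos ≤ cs.length) :
    (pvLoopB cs pos out).flatten = out.flatten ++ pvSpec cs pos := by
  rw [pvLoopB]
  set j := PySem.Chars.findFrom cs pvMem (pos : Int) with hj_def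
  by_cases hj : j = -1
  · -- no further occurrence: B emits the tail slice, pvSpec copies the tail
    have hno : ¬ pvMem <:+: List.drop pos cs :=
      (PySem.Chars.findFrom_natCast_eq_neg_one_iff cs pvMem pos hpos).1 hj
    have hnone : ∀ i, pos ≤ i → ¬ pvMem <+: List.drop i cs := by
      intro i hi hpre
      apply hno
      have : List.drop i cs = List.drop (i - pos) (List.drop pos cs) := by
        rw [List.drop_drop]; congr 1; omega
      rw [this] at hpre
      exact pvPrefix_drop_infix hpre
    simp [hj, pvSpec_no_match cs pos hnone, PySem.List.slice_from cs (by positivity : (0:Int) ≤ (pos:Int))]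
  · obtain ⟨hple, hfit⟩ := pvFindFrom_facts cs pos hj
    obtain ⟨hle', hpre, hmin⟩ := PySem.Chars.findFrom_natCast_spec cs pvMem pos hpos hj
    have hjnn : 0 ≤ j := le_trans (by positivity) hle'
    have hjn : j = ((j.toNat : Nat) : Int) := by omega
    have hcopy : pvSpec cs pos =
        List.take (j.toNat - pos) (List.drop pos cs) ++ pvSpec cs j.toNat :=
      pvSpec_copy cs pos j.toNat hple (by omega)
        (fun i hi hij => hmin i hi hij)
    have hjl : j.toNat < cs.length := by omega
    have hsw : PySem.Chars.startswith (List.drop j.toNat cs) pvMem = true :=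
      (PySem.Chars.startswith_iff _ _).2 hpre
    -- B's boundary test at j equals A's boundary test at i = j.toNat
    have hafter : (j + 3 == (cs.length : Int) || ! PySem.Chars.isalnum (cs.getD (j.toNat + 3) ' '))
        = (j.toNat + 3 == cs.length || ! PySem.Chars.isalnum (cs.getD (j.toNat + 3) ' ')) := by
      have : (j + 3 == (cs.length : Int)) = (j.toNat + 3 == cs.length) := by
        rw [Bool.eq_iff_iff]
        simp only [beq_iff_eq]
        omega
      rw [this]
    have hprev : (j == 0 || ! PySem.Chars.isalnum (cs.getD (j.toNat - 1) ' '))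
        = (j.toNat == 0 || ! PySem.Chars.isalnum (cs.getD (j.toNat - 1) ' ')) := by
      have : (j == (0 : Int)) = (j.toNat == 0) := by
        rw [Bool.eq_iff_iff]
        simp only [beq_iff_eq]
        omega
      rw [this]
    by_cases hc : ((j.toNat + 3 == cs.length || ! PySem.Chars.isalnum (cs.getD (j.toNat + 3) ' '))
        && (j.toNat == 0 || ! PySem.Chars.isalnum (cs.getD (j.toNat - 1) ' '))) = true
    · -- bare "mem": both replace and continue at j + 3
      have hspecj : pvSpec cs j.toNat = pvMemParen ++ pvSpec cs (j.toNat + 3) := by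
        rw [pvSpec, dif_pos hjl, hsw, Bool.true_and, if_pos hc]
      have hcond : ((j == 0 || ! PySem.Chars.isalnum (cs.getD (j.toNat - 1) ' '))
          && (j + 3 == (cs.length : Int) || ! PySem.Chars.isalnum (cs.getD (j.toNat + 3) ' '))) = true := by
        rw [hafter, hprev, Bool.and_comm]; exact hc
      rw [dif_neg hj, if_pos hcond,
        pvLoopB_eq cs (j.toNat + 3) _ (by omega), hcopy, hspecj]
      have hslice : PySem.List.slice cs (some (pos : Int)) (some j)
          = List.take (j.toNat - pos) (List.drop pos cs) := by
        rw [hjn]; exact PySem.List.slice_natCast cs pos j.toNat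
      simp [hslice]
    · -- occurrence is not bare: both copy through position j and continue at j + 1
      have hspecj : pvSpec cs j.toNat = cs.getD j.toNat ' ' :: pvSpec cs (j.toNat + 1) := by
        rw [pvSpec, dif_pos hjl, hsw, Bool.true_and, if_neg hc]
      have hcond : ¬ ((j == 0 || ! PySem.Chars.isalnum (cs.getD (j.toNat - 1) ' '))
          && (j + 3 == (cs.length : Int) || ! PySem.Chars.isalnum (cs.getD (j.toNat + 3) ' '))) = true := by
        rw [hafter, hprev, Bool.and_comm]; exact hc
      rw [dif_neg hj, if_neg hcond,
        pvLoopB_eq cs (j.toNat + 1) _ (by omega), hcopy, hspecj]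
      have hslice : PySem.List.slice cs (some (pos : Int)) (some (j + 1))
          = List.take (j.toNat - pos) (List.drop pos cs) ++ [cs.getD j.toNat ' '] := by
        have hj1 : j + 1 = ((j.toNat + 1 : Nat) : Int) := by omega
        rw [hj1, PySem.List.slice_natCast cs pos (j.toNat + 1)]
        have h2 : j.toNat + 1 - pos = (j.toNat - pos) + 1 := by omega
        rw [h2, List.take_succ]
        congr 1
        have hidx : (List.drop pos cs)[j.toNat - pos]? = some cs[j.toNat] := by
          rw [List.getElem?_drop]
          have h3 : pos + (j.toNat - pos) = j.toNat := by omega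
          rw [h3, List.getElem?_eq_getElem hjl]
        rw [hidx, List.getD_eq_getElem cs ' ' hjl]
        rfl
      simp [hslice]
  termination_by cs.length + 3 - pos
  decreasing_by
    · omega
    · omega

-- ===== VERDICT (by name: the statement is the Claim_ definition above) =====
theorem replace_bare_mem_py_spec : Claim_equal_replace_bare_mem_py := by
  intro expr _
  unfold Spec_replace_bare_mem_py replace_bare_mem_py replace_bare_mem_py_alt
  rw [pvLoopA_eq, pvLoopB_eq expr.toList 0 [] (by omega)]
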